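-- pv_equiv track=rewrite | github.com/sarahjxu/ESC180-CIV102 | Lectures/L22-1.py | n_as_plus_b1
-- ===== SOURCE A (Python) =====
-- def n_as_plus_b1(s, n):
--     cur_run_a = 0
--     for i in range(len(s)):
--         if s[i] == "a":
--             cur_run_a += 1
--         else:
--             if s[i] == "b":
--                 if cur_run_a == n:
--                     if i == len(s)-1:
--                         return True
--                     if s[i+1] != "b":
--                         return True
--             cur_run_a = 0
--     return False
-- ===== SOURCE B (Python) =====
-- def n_as_plus_b1(s, n):
--     L = len(s)
--
--     def run_before(j):
--         # length of the maximal run of 'a's ending just before index j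
--         if j > 0 and s[j - 1] == "a":
--             return run_before(j - 1) + 1
--         return 0
--
--     return any(s[i] == "b"
--                and (i == L - 1 or s[i + 1] != "b")
--                and run_before(i) == n
--                for i in range(L))
-- ===== Notes on version B (the rewrite author's own statement) =====
-- stated objective: alternative
-- what changed: Replaced A's forward state-machine scan (a mutable run counter with early return) by a declarative existence test: any() over all positions of a per-index predicate, with the run of a's before a position computed by a recursive backward count.
import Mathlib
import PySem

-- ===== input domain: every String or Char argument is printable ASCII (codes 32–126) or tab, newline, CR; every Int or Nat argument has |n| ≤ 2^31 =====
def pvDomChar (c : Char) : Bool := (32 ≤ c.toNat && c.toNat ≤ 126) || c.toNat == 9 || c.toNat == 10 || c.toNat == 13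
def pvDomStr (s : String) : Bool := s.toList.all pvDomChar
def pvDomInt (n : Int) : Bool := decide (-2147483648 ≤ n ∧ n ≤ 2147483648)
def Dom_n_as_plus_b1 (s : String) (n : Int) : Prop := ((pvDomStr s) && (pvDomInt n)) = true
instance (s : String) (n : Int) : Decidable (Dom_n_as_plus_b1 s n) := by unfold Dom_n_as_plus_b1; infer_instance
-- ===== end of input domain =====

-- B replaces A's forward state-machine scan by an existence test over positions
-- (a per-index predicate with a backward run count); objective: alternative, same cost.

-- ===== PORT A =====
-- A's for-loop with early return, as structural recursion on the character list:
-- `rest = []` is A's `i == len(s)-1`, `rest.headD ' '` is A's `s[i+1]`.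
def pvGoA (n : Int) : List Char → Int → Bool
  | [], _ => false
  | c :: rest, run =>
    if c = 'a' then pvGoA n rest (run + 1)
    else
      if c = 'b' then
        if run = n then
          if rest = [] then true
          else if rest.headD ' ' ≠ 'b' then true
          else pvGoA n rest 0
        else pvGoA n rest 0
      else pvGoA n rest 0

def n_as_plus_b1 (s : String) (n : Int) : Bool := pvGoA n s.toList 0

-- ===== PORT B =====
-- B's recursive run_before(j): length of the maximal run of 'a's ending just before index j.
def pvRunBefore (cs : List Char) : Nat → Nat
  | 0 => 0
  | j + 1 => if cs.getD j ' ' = 'a' then pvRunBefore cs j + 1 else 0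

-- B's per-index predicate inside the any(...)
def pvPredB (cs : List Char) (n : Int) (i : Nat) : Bool :=
  decide (cs.getD i ' ' = 'b')
    && (decide (i = cs.length - 1) || decide (cs.getD (i + 1) ' ' ≠ 'b'))
    && decide ((pvRunBefore cs i : Int) = n)

def n_as_plus_b1_alt (s : String) (n : Int) : Bool :=
  (List.range s.toList.length).any (pvPredB s.toList n)

-- ===== PRECONDITION & SPEC =====
def Spec_n_as_plus_b1 (s : String) (n : Int) (out : Bool) : Prop := out = n_as_plus_b1_alt s n
instance (s : String) (n : Int) (out : Bool) : Decidable (Spec_n_as_plus_b1 s n out) := by unfold Spec_n_as_plus_b1; infer_instance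

-- ===== CLAIM (what is proved, stated in full; the proofs are below) =====
def Claim_equal_n_as_plus_b1 : Prop := ∀ (s : String) (n : Int), Dom_n_as_plus_b1 s n → Spec_n_as_plus_b1 s n (n_as_plus_b1 s n)

-- ===== LEMMAS AND PROOFS =====

theorem pvGoA_cons (n : Int) (c : Char) (rest : List Char) (run : Int) :
    pvGoA n (c :: rest) run =
      if c = 'a' then pvGoA n rest (run + 1)
      else
        if c = 'b' then
          if run = n then
            if rest = [] then true
            else if rest.headD ' ' ≠ 'b' then true
            else pvGoA n rest 0
          else pvGoA n rest 0
        else pvGoA n rest 0 := rfl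

-- loop invariant: A's running counter at split point pre/suf equals B's backward count
theorem pvGoA_eq (n : Int) (cs : List Char) :
    ∀ suf pre : List Char, cs = pre ++ suf →
      pvGoA n suf ((pvRunBefore cs pre.length : Int)) =
        (List.range' pre.length suf.length 1).any (pvPredB cs n) := by
  intro suf
  induction suf with
  | nil => intro pre h; simp [pvGoA]
  | cons c rest ih =>
    intro pre h
    have hlen : cs.length = pre.length + rest.length + 1 := by simp [h]; omega
    have hc : cs[pre.length]? = some c := by
      rw [h]; rw [List.getElem?_append_right (Nat.le_refl _)]; simp
    have hnext : cs[pre.length + 1]? = rest[0]? := by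
      rw [h, List.getElem?_append_right (by omega)]
      simp
    have hrb0 : ¬ c = 'a' → pvRunBefore cs (pre.length + 1) = 0 := by
      intro ha
      show (if cs.getD pre.length ' ' = 'a' then pvRunBefore cs pre.length + 1 else 0) = 0
      simp [List.getD, hc, ha]
    have hrb1 : c = 'a' →
        (pvRunBefore cs (pre.length + 1) : Int) = (pvRunBefore cs pre.length : Int) + 1 := by
      intro ha
      show ((if cs.getD pre.length ' ' = 'a' then pvRunBefore cs pre.length + 1 else 0 : Nat) : Int) = _
      simp [List.getD, hc, ha]
    have hstep := ih (pre ++ [c]) (by simp [h])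
    simp only [List.length_append, List.length_cons, List.length_nil, Nat.zero_add] at hstep
    have hrange : List.range' pre.length (c :: rest).length 1
        = pre.length :: List.range' (pre.length + 1) rest.length 1 := by
      simp [List.range'_succ]
    rw [hrange, List.any_cons, pvGoA_cons]
    by_cases ha : c = 'a'
    · have hpred : pvPredB cs n pre.length = false := by
        simp [pvPredB, List.getD, hc, ha]
      rw [hpred, if_pos ha, Bool.false_or, ← hstep, hrb1 ha]
    · rw [if_neg ha]
      by_cases hb : c = 'b'
      · rw [if_pos hb]
        by_cases hrun : (pvRunBefore cs pre.length : Int) = n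
        · rw [if_pos hrun]
          cases rest with
          | nil =>
            have h1 : (decide (pre.length = cs.length - 1)) = true := by
              simp only [List.length_nil] at hlen; simp; omega
            have hpred : pvPredB cs n pre.length = true := by
              simp [pvPredB, List.getD, hc, hb, hrun, h1]
            simp [hpred]
          | cons x xs =>
            by_cases hx : x = 'b'
            · have hpred : pvPredB cs n pre.length = false := by
                have h1 : ¬ pre.length = cs.length - 1 := by
                  simp only [List.length_cons] at hlen; omega
                simp [pvPredB, List.getD, hnext, hx, h1]
              rw [hpred, Bool.false_or]
              rw [if_neg (by simp : ¬ (x :: xs : List Char) = []), List.headD_cons,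
                if_neg (by simp [hx]), ← hstep, hrb0 ha]
              simp
            · have hpred : pvPredB cs n pre.length = true := by
                simp [pvPredB, List.getD, hc, hb, hrun, hnext, hx]
              simp [hpred, hx]
        · have hpred : pvPredB cs n pre.length = false := by
            simp [pvPredB, hrun]
          rw [hpred, Bool.false_or, if_neg hrun, ← hstep, hrb0 ha]
          simp
      · have hpred : pvPredB cs n pre.length = false := by
          simp [pvPredB, List.getD, hc, hb]
        rw [hpred, Bool.false_or, if_neg hb, ← hstep, hrb0 ha]
        simp

-- ===== VERDICT (by name: the statement is the Claim_ definition above) =====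
theorem n_as_plus_b1_spec : Claim_equal_n_as_plus_b1 := by
  intro s n _
  unfold Spec_n_as_plus_b1 n_as_plus_b1 n_as_plus_b1_alt
  have h := pvGoA_eq n s.toList s.toList [] rfl
  simpa [pvRunBefore, List.range_eq_range'] using h
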